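-- pv_equiv track=rewrite | github.com/luismgsilva/scripts | search-exp.py | find_running_after_keyword
-- ===== SOURCE A (Python) =====
-- def find_running_after_keyword(log_lines, keyword):
-- 	found_keyword = False
--
-- 	for line in log_lines:
-- 		if keyword in line:
-- 			found_keyword = True
--
-- 		if found_keyword and line.strip().startswith("Running"):
-- 			return line.strip()
--
-- 	return None
-- ===== SOURCE B (Python) =====
-- def find_running_after_keyword(log_lines, keyword):
-- 	idx = next((i for i, line in enumerate(log_lines) if keyword in line), None)
-- 	if idx is None:
-- 		return None
-- 	for line in log_lines[idx:]:
-- 		stripped = line.strip()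
-- 		if stripped.startswith("Running"):
-- 			return stripped
-- 	return None
-- ===== Notes on version B (the rewrite author's own statement) =====
-- stated objective: alternative
-- what changed: Replaces A's single interleaved flag-tracking pass with two phases: locate the index of the first line containing the keyword, then scan the suffix from that index (inclusive) for the first line whose strip() starts with 'Running'.
import Mathlib
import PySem

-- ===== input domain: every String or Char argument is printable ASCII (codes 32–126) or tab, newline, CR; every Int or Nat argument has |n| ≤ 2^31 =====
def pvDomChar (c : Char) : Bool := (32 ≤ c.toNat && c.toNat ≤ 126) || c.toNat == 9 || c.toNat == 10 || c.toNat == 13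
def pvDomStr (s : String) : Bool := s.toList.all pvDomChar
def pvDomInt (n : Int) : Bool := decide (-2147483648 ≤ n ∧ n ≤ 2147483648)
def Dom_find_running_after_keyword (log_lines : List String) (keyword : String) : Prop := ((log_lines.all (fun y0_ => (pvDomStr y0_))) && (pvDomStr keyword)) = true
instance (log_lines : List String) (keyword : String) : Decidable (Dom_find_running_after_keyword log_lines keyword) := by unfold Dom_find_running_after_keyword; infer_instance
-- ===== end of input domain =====

-- B replaces A's single flag-tracking pass with two phases (find keyword index, then scan the suffix); alternative decomposition, same cost.

-- ===== PORT A =====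
-- the for-loop with the `found_keyword` flag, as structural recursion over the lines with the flag as state
def fraKwGo (keyword : String) : List String → Bool → Option String
  | [], _ => none
  | line :: rest, found_keyword =>
    let found_keyword := if PySem.Str.isIn keyword line then true else found_keyword
    if found_keyword && PySem.Str.startswith (PySem.Str.strip line) "Running" then
      some (PySem.Str.strip line)
    else
      fraKwGo keyword rest found_keyword

def find_running_after_keyword (log_lines : List String) (keyword : String) : Option String :=
  fraKwGo keyword log_lines false

-- ===== PORT B =====
-- phase 1: index of the first line containing keyword; phase 2: first 'Running' line in log_lines[idx:]
def find_running_after_keyword_alt (log_lines : List String) (keyword : String) : Option String :=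
  match log_lines.findIdx? (fun line => PySem.Str.isIn keyword line) with
  | none => none
  | some idx =>
    -- log_lines[idx:] with 0 ≤ idx ≤ len is List.drop idx
    ((log_lines.drop idx).find?
      (fun line => PySem.Str.startswith (PySem.Str.strip line) "Running")).map PySem.Str.strip

-- ===== PRECONDITION & SPEC =====
def Spec_find_running_after_keyword (log_lines : List String) (keyword : String) (out : Option String) : Prop := out = find_running_after_keyword_alt log_lines keyword
instance (log_lines : List String) (keyword : String) (out : Option String) : Decidable (Spec_find_running_after_keyword log_lines keyword out) := by unfold Spec_find_running_after_keyword; infer_instance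

-- ===== CLAIM (what is proved, stated in full; the proofs are below) =====
def Claim_equal_find_running_after_keyword : Prop := ∀ (log_lines : List String) (keyword : String), Dom_find_running_after_keyword log_lines keyword → Spec_find_running_after_keyword log_lines keyword (find_running_after_keyword log_lines keyword)

-- ===== LEMMAS AND PROOFS =====

-- once the flag is set, A just returns the first stripped 'Running' line of the remainder
theorem fraKwGo_true (keyword : String) (ls : List String) :
    fraKwGo keyword ls true =
      (ls.find? (fun line => PySem.Str.startswith (PySem.Str.strip line) "Running")).map PySem.Str.strip := by
  induction ls with
  | nil => rfl
  | cons l rest ih =>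
    cases h : PySem.Chars.startswith (PySem.Chars.strip l.toList) ['R','u','n','n','i','n','g'] <;>
      simp [fraKwGo, h, ih]

theorem fraKwGo_false_eq_alt (keyword : String) (ls : List String) :
    fraKwGo keyword ls false = find_running_after_keyword_alt ls keyword := by
  induction ls with
  | nil => rfl
  | cons l rest ih =>
    cases hk : PySem.Chars.isIn keyword.toList l.toList
    · -- keyword not in this line: A keeps the flag false, B's keyword index (if any) lies in rest
      have hk' : PySem.Str.isIn keyword l = false := by simp [hk]
      have hL : fraKwGo keyword (l :: rest) false = fraKwGo keyword rest false := by
        simp [fraKwGo, hk]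
      rw [hL, ih]
      simp only [find_running_after_keyword_alt, List.findIdx?_cons, hk']
      cases hidx : List.findIdx? (fun line => PySem.Str.isIn keyword line) rest <;>
        simp [*]
    · -- keyword found here: A's flag turns true now, B's index is 0 and it scans from this line
      cases h : PySem.Chars.startswith (PySem.Chars.strip l.toList) ['R','u','n','n','i','n','g'] <;>
        simp [fraKwGo, find_running_after_keyword_alt, List.findIdx?_cons,
          hk, h, fraKwGo_true]

-- ===== VERDICT (by name: the statement is the Claim_ definition above) =====
theorem find_running_after_keyword_spec : Claim_equal_find_running_after_keyword := by
  intro log_lines keyword _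
  unfold Spec_find_running_after_keyword find_running_after_keyword
  exact fraKwGo_false_eq_alt keyword log_lines
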